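-- pv_equiv track=rewrite | github.com/wioota/GreatCTObrochure | plugins/substack_importer.py | _is_paywalled
-- ===== SOURCE A (Python) =====
-- def _is_paywalled(content):
--     """Check if content appears to be paywalled"""
--     paywall_indicators = [
--         'subscribe to read',
--         'upgrade to paid',
--         'become a paid subscriber',
--         'this post is for paying subscribers',
--         'paywall'
--     ]
--
--     content_lower = content.lower()
--     return any(indicator in content_lower for indicator in paywall_indicators)
-- ===== SOURCE B (Python) =====
-- def _is_paywalled(content):
--     """Check if content appears to be paywalled"""
--     indicators = (
--         'subscribe to read',
--         'upgrade to paid',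
--         'become a paid subscriber',
--         'this post is for paying subscribers',
--         'paywall',
--     )
--     text = content.lower()
--     for i in range(len(text)):
--         for ind in indicators:
--             if text.startswith(ind, i):
--                 return True
--     return False
-- ===== Notes on version B (the rewrite author's own statement) =====
-- stated objective: alternative
-- what changed: Replaces k independent substring-membership scans ('ind in text' per indicator) by a single left-to-right pass over positions that checks each indicator with startswith at the current position, returning on the first hit.
import Mathlib
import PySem

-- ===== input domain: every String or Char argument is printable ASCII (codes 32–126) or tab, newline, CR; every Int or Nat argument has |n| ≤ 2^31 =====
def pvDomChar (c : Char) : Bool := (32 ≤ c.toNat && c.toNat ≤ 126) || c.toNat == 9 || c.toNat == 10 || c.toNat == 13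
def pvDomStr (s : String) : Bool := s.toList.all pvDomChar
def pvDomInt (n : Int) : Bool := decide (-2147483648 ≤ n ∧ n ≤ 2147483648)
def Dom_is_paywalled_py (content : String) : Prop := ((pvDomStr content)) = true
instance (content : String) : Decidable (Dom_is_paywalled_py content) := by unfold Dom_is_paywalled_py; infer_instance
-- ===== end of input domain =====

-- B replaces the per-indicator 'in' substring scans by one left-to-right pass over positions
-- checking each indicator with startswith at the current position (alternative, same cost).

-- ===== PORT A =====
-- A's indicator list
def pvIndicators : List String :=
  ["subscribe to read", "upgrade to paid", "become a paid subscriber",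
   "this post is for paying subscribers", "paywall"]

-- A: lowercase once, then any(indicator in content_lower for indicator in paywall_indicators)
def is_paywalled_py (content : String) : Bool :=
  let content_lower := PySem.Str.lower content
  pvIndicators.any (fun ind => PySem.Str.isIn ind content_lower)

-- ===== PORT B =====
-- B's indicator list, on the char-list side (same strings)
def pvIndicatorsB : List (List Char) := pvIndicators.map String.toList

-- B's outer loop over positions i = the obvious recursion over the suffixes of the text;
-- at each position the inner loop checks text.startswith(ind, i).
def pvScan (inds : List (List Char)) : List Char → Bool
  | [] => false
  | c :: rest =>
    (inds.any fun ind => PySem.Chars.startswith (c :: rest) ind) || pvScan inds rest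

def is_paywalled_py_alt (content : String) : Bool :=
  pvScan pvIndicatorsB (PySem.Chars.lower content.toList)

-- ===== PRECONDITION & SPEC =====
def Spec_is_paywalled_py (content : String) (out : Bool) : Prop := out = is_paywalled_py_alt content
instance (content : String) (out : Bool) : Decidable (Spec_is_paywalled_py content out) := by unfold Spec_is_paywalled_py; infer_instance

-- ===== CLAIM (what is proved, stated in full; the proofs are below) =====
def Claim_equal_is_paywalled_py : Prop := ∀ (content : String), Dom_is_paywalled_py content → Spec_is_paywalled_py content (is_paywalled_py content)

-- ===== LEMMAS AND PROOFS =====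

-- The position scan finds an indicator iff some (nonempty) indicator is a prefix of some suffix.
theorem pvScan_iff (inds : List (List Char)) (hne : ∀ ind ∈ inds, ind ≠ []) (s : List Char) :
    pvScan inds s = true ↔ ∃ ind ∈ inds, ∃ j, ind <+: List.drop j s := by
  induction s with
  | nil =>
    simp only [pvScan, List.drop_nil]
    constructor
    · intro h; exact absurd h (by decide)
    · rintro ⟨ind, hind, j, hpre⟩
      exact absurd (List.prefix_nil.mp hpre) (hne ind hind)
  | cons c rest ih =>
    simp only [pvScan]
    rw [Bool.or_eq_true, ih, List.any_eq_true]
    constructor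
    · rintro (⟨ind, hind, hsw⟩ | ⟨ind, hind, j, hpre⟩)
      · exact ⟨ind, hind, 0, by simpa using (PySem.Chars.startswith_iff _ _).mp hsw⟩
      · exact ⟨ind, hind, j + 1, by simpa using hpre⟩
    · rintro ⟨ind, hind, j, hpre⟩
      cases j with
      | zero => exact Or.inl ⟨ind, hind, (PySem.Chars.startswith_iff _ _).mpr (by simpa using hpre)⟩
      | succ j => exact Or.inr ⟨ind, hind, j, by simpa using hpre⟩

-- ===== VERDICT (by name: the statement is the Claim_ definition above) =====
theorem is_paywalled_py_spec : Claim_equal_is_paywalled_py := by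
  intro content _
  unfold Spec_is_paywalled_py is_paywalled_py is_paywalled_py_alt
  have hne : ∀ ind ∈ pvIndicatorsB, ind ≠ [] := by decide
  rw [Bool.eq_iff_iff, pvScan_iff pvIndicatorsB hne]
  rw [List.any_eq_true]
  constructor
  · rintro ⟨ind, hind, hIn⟩
    refine ⟨ind.toList, List.mem_map_of_mem hind, ?_⟩
    have := (PySem.Chars.exists_prefix_drop_iff_isIn (sub := ind.toList)
      (s := (PySem.Str.lower content).toList)).mpr (by simpa using hIn)
    simpa [PySem.Str.toList_lower] using this
  · rintro ⟨indL, hindL, j, hpre⟩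
    obtain ⟨ind, hind, rfl⟩ := List.mem_map.mp hindL
    refine ⟨ind, hind, ?_⟩
    have : PySem.Chars.isIn ind.toList (PySem.Str.lower content).toList = true := by
      apply (PySem.Chars.exists_prefix_drop_iff_isIn _ _).mp
      exact ⟨j, by simpa [PySem.Str.toList_lower] using hpre⟩
    simpa using this
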